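-- pv_equiv track=rewrite | github.com/Jain-Ayush-11/Kavach-2023 | core/views.py | is_valid_address
-- ===== SOURCE A (Python) =====
-- def is_valid_address(address):
--     # Check if the address length is between 26 and 35 characters
--     if len(address) < 26 or len(address) > 35:
--         return False
--     # Check if the address starts with 1, 3, or bc1 (for legacy, segwit, and bech32 formats respectively)
--     if not (address.startswith("1") or address.startswith("3") or address.startswith("bc1")):
--         return False
--     # Check if the address contains only alphanumeric characters (excluding uppercase O, uppercase I, lowercase l, and number 0)
--     valid_chars = "123456789ABCDEFGHJKLMNPQRSTUVWXYZabcdefghijkmnopqrstuvwxyz"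
--     for char in address:
--         if char not in valid_chars:
--             return False
--     # TODO: Add more validation rules such as checksum and version byte checks (optional)
--     return True
-- ===== SOURCE B (Python) =====
-- def is_valid_address(address):
--     # Single left-to-right pass of a 5-state automaton (regex-DFA style):
--     # 0 = start, 1 = seen 'b', 2 = seen 'bc', 3 = prefix accepted, -1 = dead.
--     # Accept iff the run ends in state 3 and the length is in [26, 35].
--     ALPHABET = "123456789ABCDEFGHJKLMNPQRSTUVWXYZabcdefghijkmnopqrstuvwxyz"
--     state = 0
--     n = 0
--     for c in address:
--         n += 1
--         if c not in ALPHABET: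
--             state = -1
--         elif state == 0:
--             state = 3 if c in "13" else (1 if c == "b" else -1)
--         elif state == 1:
--             state = 2 if c == "c" else -1
--         elif state == 2:
--             state = 3 if c == "1" else -1
--     return state == 3 and 26 <= n <= 35
-- ===== Notes on version B (the rewrite author's own statement) =====
-- stated objective: alternative
-- what changed: Replaces A's staged checks (length test, startswith tests, then a per-character membership loop) with a single left-to-right pass of an explicit 5-state finite automaton (regex-DFA style) that consumes each character exactly once and accepts on final state plus the 26-35 length window.
import Mathlib
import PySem

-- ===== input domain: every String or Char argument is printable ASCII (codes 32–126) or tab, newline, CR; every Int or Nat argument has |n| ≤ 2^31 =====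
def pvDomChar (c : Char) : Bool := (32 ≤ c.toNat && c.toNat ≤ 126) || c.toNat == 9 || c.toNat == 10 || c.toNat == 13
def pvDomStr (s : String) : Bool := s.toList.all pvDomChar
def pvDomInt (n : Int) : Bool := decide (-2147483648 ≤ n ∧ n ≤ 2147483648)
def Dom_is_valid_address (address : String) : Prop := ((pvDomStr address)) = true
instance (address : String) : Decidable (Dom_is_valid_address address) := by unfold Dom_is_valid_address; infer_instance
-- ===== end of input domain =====

-- B replaces A's staged checks (length, startswith, per-character loop) with one
-- left-to-right pass of an explicit 5-state finite automaton (alternative; same cost).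

-- ===== PORT A =====
def validCharsA : List Char := "123456789ABCDEFGHJKLMNPQRSTUVWXYZabcdefghijkmnopqrstuvwxyz".toList

-- the 'for char in address: if char not in valid_chars: return False' loop
def aCharLoop : List Char → Bool
  | [] => true
  | c :: rest => if ¬ (validCharsA.contains c) then false else aCharLoop rest

def is_valid_address (address : String) : Bool :=
  if address.toList.length < 26 ∨ address.toList.length > 35 then false
  else if ¬ (PySem.Str.startswith address "1" ∨ PySem.Str.startswith address "3"
             ∨ PySem.Str.startswith address "bc1") then false
  else aCharLoop address.toList

-- ===== PORT B =====
def alphaB : List Char := "123456789ABCDEFGHJKLMNPQRSTUVWXYZabcdefghijkmnopqrstuvwxyz".toList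

-- DFA transition: states 0 = start, 1 = seen 'b', 2 = seen "bc", 3 = prefix accepted, -1 = dead
def dfaStep (state : Int) (c : Char) : Int :=
  if ¬ (alphaB.contains c) then -1
  else if state == 0 then (if ("13".toList).contains c then 3 else if c == 'b' then 1 else -1)
  else if state == 1 then (if c == 'c' then 2 else -1)
  else if state == 2 then (if c == '1' then 3 else -1)
  else state

def is_valid_address_alt (address : String) : Bool :=
  let r := address.toList.foldl (fun (st : Int × Int) c => (dfaStep st.1 c, st.2 + 1)) (0, 0)
  (r.1 == 3) && decide ((26:Int) ≤ r.2) && decide (r.2 ≤ (35:Int))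

-- ===== PRECONDITION & SPEC =====
def Spec_is_valid_address (address : String) (out : Bool) : Prop := out = is_valid_address_alt address
instance (address : String) (out : Bool) : Decidable (Spec_is_valid_address address out) := by unfold Spec_is_valid_address; infer_instance

-- ===== CLAIM (what is proved, stated in full; the proofs are below) =====
def Claim_equal_is_valid_address : Prop := ∀ (address : String), Dom_is_valid_address address → Spec_is_valid_address address (is_valid_address address)

-- ===== LEMMAS AND PROOFS =====

theorem aCharLoop_eq_all (cs : List Char) : aCharLoop cs = cs.all (fun c => validCharsA.contains c) := by
  induction cs with
  | nil => rfl
  | cons c rest ih => by_cases h : validCharsA.contains c <;> simp [aCharLoop, h, ih]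

theorem startswith_iff' (s p : String) :
    PySem.Str.startswith s p = true ↔ p.toList <+: s.toList := by
  simpa using PySem.Chars.startswith_iff s.toList p.toList

-- the pair fold of the B port = (state fold, length)
theorem foldPair_eq (l : List Char) (s n : Int) :
    l.foldl (fun (st : Int × Int) c => (dfaStep st.1 c, st.2 + 1)) (s, n)
      = (l.foldl dfaStep s, n + l.length) := by
  induction l generalizing s n with
  | nil => simp
  | cons c t ih => simp [ih, List.foldl_cons]; omega

theorem fold_dead (l : List Char) : l.foldl dfaStep (-1) = -1 := by
  induction l with
  | nil => rfl
  | cons c t ih =>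
    by_cases h : c ∈ alphaB <;>
      simp [List.foldl_cons, dfaStep, List.contains_iff_mem, h, ih]

theorem fold_three (l : List Char) :
    l.foldl dfaStep 3 = 3 ↔ l.all (fun c => alphaB.contains c) = true := by
  induction l with
  | nil => simp
  | cons c t ih =>
    by_cases h : c ∈ alphaB
    · simp [List.foldl_cons, dfaStep, List.contains_iff_mem, h, ih]
    · simp [List.foldl_cons, dfaStep, List.contains_iff_mem, h, fold_dead]

theorem fold_two (l : List Char) :
    l.foldl dfaStep 2 = 3 ↔ (['1'] <+: l ∧ l.all (fun c => alphaB.contains c) = true) := by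
  cases l with
  | nil => simp
  | cons c t =>
    by_cases h1 : c = '1'
    · subst h1
      have hm : '1' ∈ alphaB := by decide
      have hs : dfaStep 2 '1' = 3 := by decide
      simp [List.foldl_cons, hs, fold_three, List.cons_prefix_cons, hm, List.contains_iff_mem]
    · have hs : dfaStep 2 c = -1 := by
        by_cases h : c ∈ alphaB <;>
          simp [dfaStep, List.contains_iff_mem, h, h1]
      simp [List.foldl_cons, hs, fold_dead, List.cons_prefix_cons]
      intro h; exact absurd h.symm h1

theorem fold_one (l : List Char) :
    l.foldl dfaStep 1 = 3 ↔ (['c','1'] <+: l ∧ l.all (fun c => alphaB.contains c) = true) := by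
  cases l with
  | nil => simp
  | cons c t =>
    by_cases hc : c = 'c'
    · subst hc
      have hm : 'c' ∈ alphaB := by decide
      have hs : dfaStep 1 'c' = 2 := by decide
      simp [List.foldl_cons, hs, fold_two, List.cons_prefix_cons, hm, List.contains_iff_mem]
    · have hs : dfaStep 1 c = -1 := by
        by_cases h : c ∈ alphaB <;>
          simp [dfaStep, List.contains_iff_mem, h, hc]
      simp [List.foldl_cons, hs, fold_dead, List.cons_prefix_cons]
      intro h; exact absurd h.symm hc

theorem fold_zero (l : List Char) :
    l.foldl dfaStep 0 = 3 ↔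
      ((['1'] <+: l ∨ ['3'] <+: l ∨ ['b','c','1'] <+: l)
        ∧ l.all (fun c => alphaB.contains c) = true) := by
  cases l with
  | nil => simp
  | cons c t =>
    by_cases h1 : c = '1'
    · subst h1
      have hm : '1' ∈ alphaB := by decide
      have hs : dfaStep 0 '1' = 3 := by decide
      simp [List.foldl_cons, hs, fold_three, List.cons_prefix_cons, hm, List.contains_iff_mem]
    · by_cases h3 : c = '3'
      · subst h3
        have hm : '3' ∈ alphaB := by decide
        have hs : dfaStep 0 '3' = 3 := by decide
        simp [List.foldl_cons, hs, fold_three, List.cons_prefix_cons, hm, List.contains_iff_mem]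
      · by_cases hb : c = 'b'
        · subst hb
          have hm : 'b' ∈ alphaB := by decide
          have hs : dfaStep 0 'b' = 1 := by decide
          simp [List.foldl_cons, hs, fold_one, List.cons_prefix_cons, hm, List.contains_iff_mem]
        · have hs : dfaStep 0 c = -1 := by
            by_cases h : c ∈ alphaB
            · have h13 : c ∉ ("13".toList) := by
                simp [show ("13".toList) = ['1','3'] from rfl, h1, h3]
              simp [dfaStep, List.contains_iff_mem, h, hb]
              exact ⟨h1, h3⟩
            · simp [dfaStep, List.contains_iff_mem, h]
          simp [List.foldl_cons, hs, fold_dead, List.cons_prefix_cons]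
          intro h
          rcases h with h | h | h
          · exact absurd h.symm h1
          · exact absurd h.symm h3
          · exact absurd h.1.symm hb

-- ===== VERDICT (by name: the statement is the Claim_ definition above) =====
theorem is_valid_address_spec : Claim_equal_is_valid_address := by
  intro address _
  unfold Spec_is_valid_address is_valid_address is_valid_address_alt
  set l := address.toList with hl
  simp only [foldPair_eq]
  by_cases hlen : l.length < 26 ∨ l.length > 35
  · rw [if_pos hlen]
    rcases hlen with h | h
    · have hd : decide ((26:Int) ≤ 0 + (l.length : Int)) = false := by simp; omega
      rw [hd]; simp
    · have hd : decide (((0:Int) + (l.length : Int)) ≤ 35) = false := by simp; omega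
      rw [hd]; simp
  · have h26 : 26 ≤ l.length := by omega
    have h35 : l.length ≤ 35 := by omega
    rw [if_neg hlen]
    have hA : (decide ((26:Int) ≤ 0 + (l.length : Int))) = true := by simp; omega
    have hB : (decide (((0:Int) + (l.length : Int)) ≤ 35)) = true := by simp; omega
    rw [hA, hB]
    simp only [Bool.and_true]
    have hb : ("bc1" : String).toList = ['b','c','1'] := by decide
    by_cases hp : (PySem.Str.startswith address "1" ∨ PySem.Str.startswith address "3"
                   ∨ PySem.Str.startswith address "bc1")
    · rw [if_neg (not_not_intro hp)]
      have hpre : (['1'] <+: l ∨ ['3'] <+: l ∨ ['b','c','1'] <+: l) := by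
        rcases hp with h | h | h
        · exact Or.inl ((startswith_iff' address "1").1 h)
        · exact Or.inr (Or.inl ((startswith_iff' address "3").1 h))
        · exact Or.inr (Or.inr (by rw [← hb]; exact (startswith_iff' address "bc1").1 h))
      rw [aCharLoop_eq_all]
      rw [Bool.eq_iff_iff]
      rw [beq_iff_eq, fold_zero]
      simp only [hpre, true_and]
      exact Iff.rfl
    · rw [if_pos hp]
      have hnp : ¬ (['1'] <+: l ∨ ['3'] <+: l ∨ ['b','c','1'] <+: l) := by
        rintro (h | h | h) <;> apply hp
        · exact Or.inl ((startswith_iff' address "1").2 h)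
        · exact Or.inr (Or.inl ((startswith_iff' address "3").2 h))
        · exact Or.inr (Or.inr ((startswith_iff' address "bc1").2 (by rw [hb]; exact h)))
      have : (l.foldl dfaStep 0 == 3) = false := by
        rw [beq_eq_false_iff_ne]
        intro h
        exact hnp ((fold_zero l).1 h).1
      rw [this]
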